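-- pv_equiv track=rewrite | github.com/parth262/Daily-Coding-Problem | Problem-11.py | hash_broken_word
-- ===== SOURCE A (Python) =====
-- alphabets = "abcdefghijklmnopqrstuvwxyz"
--
-- def calculate_hash(ch):
--     i = alphabets.index(ch.lower()) + 1
--     return str(i**2 + i + 41)
--
-- hash_dict = {}
--
-- def hash_broken_word(broken_words):
--     prev_hash = None
--     for word in broken_words:
--         word_hash = ""
--         for ch in word:
--             word_hash += calculate_hash(ch)
--         if prev_hash:
--             if prev_hash not in hash_dict:
--                 hash_dict[prev_hash] = []
--             if word_hash not in hash_dict[prev_hash]: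
--                 hash_dict[prev_hash].append(word_hash)
--
--         prev_hash = word_hash
--     return prev_hash
-- ===== SOURCE B (Python) =====
-- # B: the return value of hash_broken_word is just the hash of the LAST word
-- # (or None for an empty list), so compute only that -- O(|last word|) instead of
-- # hashing every word.  Note: A additionally populates a module-level dict
-- # hash_dict as a side effect; the equivalence claimed here is about the return
-- # value only.
-- alphabets = "abcdefghijklmnopqrstuvwxyz"
--
-- def hash_broken_word(broken_words):
--     if not broken_words:
--         return None
--     h = ""
--     for ch in broken_words[-1]:
--         i = alphabets.index(ch.lower()) + 1
--         h += str(i * i + i + 41)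
--     return h
-- ===== Notes on version B (the rewrite author's own statement) =====
-- stated objective: faster
-- what changed: B observes that the returned value is only the hash of the last word, so it skips the whole-list pass (and the global hash_dict bookkeeping, a side effect outside the return-value claim) and hashes just broken_words[-1].
import Mathlib
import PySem

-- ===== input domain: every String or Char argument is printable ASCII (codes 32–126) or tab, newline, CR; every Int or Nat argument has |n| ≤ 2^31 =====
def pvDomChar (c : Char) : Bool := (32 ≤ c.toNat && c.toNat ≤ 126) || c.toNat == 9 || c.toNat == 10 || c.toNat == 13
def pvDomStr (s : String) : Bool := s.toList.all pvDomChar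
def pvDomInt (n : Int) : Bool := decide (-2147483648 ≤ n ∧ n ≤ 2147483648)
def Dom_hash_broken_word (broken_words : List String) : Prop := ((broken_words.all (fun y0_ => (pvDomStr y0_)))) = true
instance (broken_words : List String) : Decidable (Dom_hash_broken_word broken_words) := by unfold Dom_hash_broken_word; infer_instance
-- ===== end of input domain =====

-- B computes only the hash of the last word (the value A returns), skipping A's
-- whole-list pass; A's side effect on the module-level hash_dict is outside the
-- return-value equivalence proved here.

-- ===== PORT A =====
-- calculate_hash: alphabets.index raises ValueError on a non-letter; modelled as none.
def calculate_hash (ch : Char) : Option String :=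
  let idx := PySem.Str.find "abcdefghijklmnopqrstuvwxyz" (PySem.Str.lower (String.singleton ch))
  if idx = -1 then none
  else
    let i := idx + 1
    some (PySem.Int.toStr (i ^ 2 + i + 41))

-- the inner 'for ch in word' loop building word_hash (none = a char raised)
def wordHashA (word : String) : Option String :=
  word.toList.foldl (fun acc c => acc.bind fun s => (calculate_hash c).map (fun h => s ++ h)) (some "")

-- one iteration of the outer loop: state = (prev_hash, hash_dict), none = raised
def hbwStep (st : Option (Option String × PySem.Dict String (List String))) (word : String) :
    Option (Option String × PySem.Dict String (List String)) :=
  st.bind fun pd =>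
    (wordHashA word).map fun wh =>
      let d :=
        match pd.1 with
        | none => pd.2
        | some p =>
          if p ≠ "" then
            let d1 := if (pd.2.get? p).isNone then pd.2.insert p [] else pd.2
            if wh ∈ d1.getD p [] then d1 else d1.modify p [] (fun l => l ++ [wh])
          else pd.2
      (some wh, d)

def hash_broken_word (broken_words : List String) : Option String :=
  match broken_words.foldl hbwStep (some (none, (PySem.Dict.empty : PySem.Dict String (List String)))) with
  | none => none
  | some pd => pd.1

-- ===== PORT B =====
def calcAlt (ch : Char) : Option String :=
  let i := PySem.Str.find "abcdefghijklmnopqrstuvwxyz" (PySem.Str.lower (String.singleton ch)) + 1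
  if i = 0 then none
  else some (PySem.Int.toStr (i * i + i + 41))

def hash_broken_word_alt (broken_words : List String) : Option String :=
  if broken_words = [] then none
  else
    match PySem.List.pyGet? broken_words (-1) with
    | none => none   -- unreachable: the list is nonempty
    | some w => w.toList.foldl (fun acc c => acc.bind fun s => (calcAlt c).map (fun h => s ++ h)) (some "")

-- ===== PRECONDITION & SPEC =====
-- Pre_ excludes exactly the inputs on which A raises ValueError: a word containing a
-- character whose lower-case form is not one of the 26 ASCII letters.
def Pre_hash_broken_word (broken_words : List String) : Prop :=
  (broken_words.all (fun w => w.toList.all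
    (fun c => ("abcdefghijklmnopqrstuvwxyz".toList).contains (PySem.Chars.lowerChar c)))) = true
instance (broken_words : List String) : Decidable (Pre_hash_broken_word broken_words) := by
  unfold Pre_hash_broken_word; infer_instance
def pvWitness_hash_broken_word : List String := (["ab", "Cd"])
def Spec_hash_broken_word (broken_words : List String) (out : Option String) : Prop := out = hash_broken_word_alt broken_words
instance (broken_words : List String) (out : Option String) : Decidable (Spec_hash_broken_word broken_words out) := by unfold Spec_hash_broken_word; infer_instance

-- ===== CLAIM (what is proved, stated in full; the proofs are below) =====
def Claim_equal_hash_broken_word : Prop := ∀ (broken_words : List String), Dom_hash_broken_word broken_words → Pre_hash_broken_word broken_words → Spec_hash_broken_word broken_words (hash_broken_word broken_words)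

-- ===== LEMMAS AND PROOFS =====

theorem calc_eq (c : Char) : calcAlt c = calculate_hash c := by
  unfold calcAlt calculate_hash
  set idx := PySem.Str.find "abcdefghijklmnopqrstuvwxyz" (PySem.Str.lower (String.singleton c)) with hidx
  by_cases h : idx = -1
  · simp [h]
  · have h0 : ¬ idx + 1 = 0 := by omega
    simp only [h, h0]
    have : (idx + 1) * (idx + 1) + (idx + 1) + 41 = (idx + 1) ^ 2 + (idx + 1) + 41 := by ring
    rw [this]

theorem calc_isSome (c : Char)
    (h : PySem.Chars.lowerChar c ∈ "abcdefghijklmnopqrstuvwxyz".toList) :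
    (calculate_hash c).isSome := by
  unfold calculate_hash
  have hinf : [PySem.Chars.lowerChar c] <:+: "abcdefghijklmnopqrstuvwxyz".toList := by
    obtain ⟨s, t, hst⟩ := List.append_of_mem h
    exact ⟨s, t, by simp [hst]⟩
  have hne : PySem.Str.find "abcdefghijklmnopqrstuvwxyz" (PySem.Str.lower (String.singleton c)) ≠ -1 := by
    simp only [PySem.Str.find_eq, PySem.Str.toList_lower]
    have hl : PySem.Chars.lower (String.singleton c).toList = [PySem.Chars.lowerChar c] := by
      simp [PySem.Chars.lower, String.singleton]
    rw [hl]
    exact (PySem.Chars.find_ne_neg_one_iff _ _).mpr hinf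
  simp only [calculate_hash]
  rw [if_neg hne]
  simp

theorem wordHashA_isSome (w : String)
    (h : ∀ c ∈ w.toList, PySem.Chars.lowerChar c ∈ "abcdefghijklmnopqrstuvwxyz".toList) :
    (wordHashA w).isSome := by
  unfold wordHashA
  have : ∀ (l : List Char), (∀ c ∈ l, PySem.Chars.lowerChar c ∈ "abcdefghijklmnopqrstuvwxyz".toList) →
      ∀ (s : String),
      (l.foldl (fun acc c => acc.bind fun s => (calculate_hash c).map (fun h => s ++ h)) (some s)).isSome := by
    intro l
    induction l with
    | nil => intro _ s; simp
    | cons c t ih =>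
      intro hl s
      obtain ⟨h1, rest⟩ := Option.isSome_iff_exists.mp (calc_isSome c (hl c (by simp)))
      simp only [List.foldl_cons, Option.bind_some, rest, Option.map_some]
      exact ih (fun c hc => hl c (by simp [hc])) _
  exact this w.toList h ""

theorem foldA_fst (ws : List String) (p : Option String) (d : PySem.Dict String (List String))
    (h : ∀ w ∈ ws, (wordHashA w).isSome) :
    (ws.foldl hbwStep (some (p, d))).map Prod.fst = some ((ws.getLast?.map wordHashA).getD p) := by
  induction ws generalizing p d with
  | nil => simp
  | cons w rest ih =>
    obtain ⟨wh, hwh⟩ := Option.isSome_iff_exists.mp (h w (by simp))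
    have hstep : ∃ d', hbwStep (some (p, d)) w = some (some wh, d') := by
      unfold hbwStep; simp [hwh]
    obtain ⟨d', hd'⟩ := hstep
    rw [List.foldl_cons, hd']
    rw [ih (some wh) d' (fun w' hw' => h w' (by simp [hw']))]
    cases rest with
    | nil => simp [hwh]
    | cons r rs =>
      have h1 : (w :: r :: rs).getLast? = (r :: rs).getLast? := List.getLast?_cons_cons
      have h2 : ∃ lw, (r :: rs).getLast? = some lw := by
        cases hg : (r :: rs).getLast? with
        | none => exact absurd hg (by simp)
        | some lw => exact ⟨lw, rfl⟩
      obtain ⟨lw, hlw⟩ := h2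
      rw [h1, hlw]
      simp

-- ===== VERDICT (by name: the statement is the Claim_ definition above) =====
theorem hash_broken_word_spec : Claim_equal_hash_broken_word := by
  intro ws _ hpre
  unfold Spec_hash_broken_word
  cases hws : ws with
  | nil => simp [hash_broken_word, hash_broken_word_alt]
  | cons w0 rest =>
    subst hws
    have hpre' : ∀ w ∈ w0 :: rest, ∀ c ∈ w.toList,
        PySem.Chars.lowerChar c ∈ "abcdefghijklmnopqrstuvwxyz".toList := by
      unfold Pre_hash_broken_word at hpre
      simpa [List.all_eq_true, List.contains_iff_mem] using hpre
    have hsome : ∀ w ∈ w0 :: rest, (wordHashA w).isSome :=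
      fun w hw => wordHashA_isSome w (hpre' w hw)
    -- A's side
    have hA := foldA_fst (w0 :: rest) none PySem.Dict.empty hsome
    have hlast : ∃ lw, (w0 :: rest).getLast? = some lw := ⟨(w0 :: rest).getLast (by simp), List.getLast?_eq_some_getLast (by simp)⟩
    obtain ⟨lw, hlw⟩ := hlast
    rw [hlw] at hA
    simp only [Option.map_some, Option.getD_some] at hA
    have hAval : hash_broken_word (w0 :: rest) = wordHashA lw := by
      unfold hash_broken_word
      cases hf : (w0 :: rest).foldl hbwStep (some (none, PySem.Dict.empty)) with
      | none => rw [hf] at hA; simp at hA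
      | some pd => rw [hf] at hA; simpa using hA
    -- B's side
    have hget : PySem.List.pyGet? (w0 :: rest) (-1) = some lw := by
      rw [PySem.List.pyGet?_neg_ofNat (w0 :: rest) 1 (by omega) (by simp)]
      rw [← List.getLast?_eq_getElem?]
      exact hlw
    have hBval : hash_broken_word_alt (w0 :: rest) = wordHashA lw := by
      unfold hash_broken_word_alt
      rw [if_neg (by simp), hget]
      unfold wordHashA
      have hfe : (fun (acc : Option String) (c : Char) => acc.bind fun s => (calcAlt c).map (fun h => s ++ h))
               = (fun (acc : Option String) (c : Char) => acc.bind fun s => (calculate_hash c).map (fun h => s ++ h)) := by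
        funext acc c; rw [calc_eq]
      rw [hfe]
    rw [hAval, hBval]
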